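-- pv_equiv track=rewrite | github.com/openshift/release | hack/validate-trigger-trusted-apps.py | _effective_trigger
-- ===== SOURCE A (Python) =====
-- def _effective_trigger(trigger_entries, org_repo):
--     """Mirror Prow TriggerFor: prefer org/repo match, then org-only match.
--
--     Returns the first matching trigger entry (Prow uses first-match semantics)
--     or None if nothing matches.
--     """
--     if "/" in org_repo:
--         org = org_repo.split("/", 1)[0]
--     else:
--         org = org_repo
--
--     for entry in trigger_entries:
--         repos = entry.get("repos")
--         if isinstance(repos, list) and org_repo in repos:
--             return entry
--
--     if "/" in org_repo:
--         for entry in trigger_entries: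
--             repos = entry.get("repos")
--             if isinstance(repos, list) and org in repos:
--                 return entry
--
--     return None
-- ===== SOURCE B (Python) =====
-- def _effective_trigger(trigger_entries, org_repo):
--     """Build the full candidate list (rank 0 = org/repo match, rank 1 = org-only
--     match) in one comprehension, then pick the stable minimum by rank: min is
--     stable, so it returns the first rank-0 entry if any, else the first rank-1
--     entry, exactly Prow's first-match-with-preference semantics."""
--     slash = "/" in org_repo
--     org = org_repo.split("/", 1)[0] if slash else org_repo
--     matches = [
--         (0 if org_repo in repos else 1, entry)
--         for entry in trigger_entries
--         if isinstance(repos := entry.get("repos"), list)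
--         and (org_repo in repos or (slash and org in repos))
--     ]
--     return min(matches, key=lambda m: m[0])[1] if matches else None
-- ===== Notes on version B (the rewrite author's own statement) =====
-- stated objective: alternative
-- what changed: Replaces A's two sequential early-return scans by building the complete ranked candidate list (rank 0 for org/repo matches, rank 1 for org-only matches) in one comprehension and selecting the stable minimum by rank.
import Mathlib
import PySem

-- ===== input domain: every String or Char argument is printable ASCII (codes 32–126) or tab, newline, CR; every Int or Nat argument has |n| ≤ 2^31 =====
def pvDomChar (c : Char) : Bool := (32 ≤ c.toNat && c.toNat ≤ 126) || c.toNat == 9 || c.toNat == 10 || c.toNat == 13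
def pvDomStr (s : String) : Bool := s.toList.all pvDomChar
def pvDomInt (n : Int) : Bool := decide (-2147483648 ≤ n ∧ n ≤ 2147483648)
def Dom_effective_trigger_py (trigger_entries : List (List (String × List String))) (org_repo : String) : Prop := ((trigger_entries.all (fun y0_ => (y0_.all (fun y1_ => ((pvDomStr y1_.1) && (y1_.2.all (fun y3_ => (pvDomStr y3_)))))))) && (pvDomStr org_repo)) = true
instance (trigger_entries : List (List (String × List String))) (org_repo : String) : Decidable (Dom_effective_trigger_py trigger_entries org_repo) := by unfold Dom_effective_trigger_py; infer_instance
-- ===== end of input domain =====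

-- B replaces A's two sequential early-return scans by a ranked candidate list plus a stable min-by-rank selection (same cost, different algorithmic shape).


-- ===== PORT A =====
-- entry.get("repos") on the association-list dict: first matching key, none if absent
def pvGetRepos (entry : List (String × List String)) : Option (List String) :=
  (entry.find? (fun p => p.1 == "repos")).map (·.2)

-- A's loop body, used for both of A's scans (same body, a different needle)
def pvFirstMatch (needle : String) : List (List (String × List String)) → Option (List (String × List String))
  | [] => none
  | e :: rest =>
    match pvGetRepos e with
    | some repos => if needle ∈ repos then some e else pvFirstMatch needle rest
    | none => pvFirstMatch needle rest

def effective_trigger_py (trigger_entries : List (List (String × List String))) (org_repo : String) : Option (List (String × List String)) :=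
  let org := if '/' ∈ org_repo.toList then
      ((PySem.Str.splitMax? org_repo "/" 1).getD []).headD org_repo
    else org_repo
  match pvFirstMatch org_repo trigger_entries with
  | some e => some e
  | none =>
    if '/' ∈ org_repo.toList then pvFirstMatch org trigger_entries
    else none

-- ===== PORT B =====
-- B's candidate builder: the comprehension's per-entry contribution
def pvCandidate (org_repo org : String) (slash : Bool) (entry : List (String × List String)) :
    Option (Nat × List (String × List String)) :=
  (pvGetRepos entry).bind (fun repos =>
    if org_repo ∈ repos ∨ (slash = true ∧ org ∈ repos) then
      some ((if org_repo ∈ repos then 0 else 1), entry)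
    else none)

def effective_trigger_py_alt (trigger_entries : List (List (String × List String))) (org_repo : String) : Option (List (String × List String)) :=
  let slash : Bool := decide ('/' ∈ org_repo.toList)
  let org := if slash then ((PySem.Str.splitMax? org_repo "/" 1).getD []).headD org_repo else org_repo
  let cands := trigger_entries.filterMap (pvCandidate org_repo org slash)
  match cands with
  | [] => none
  | _ => (PySem.List.min? cands (fun m => m.1)).map (fun m => m.2)

-- ===== PRECONDITION & SPEC =====
def Spec_effective_trigger_py (trigger_entries : List (List (String × List String))) (org_repo : String) (out : Option (List (String × List String))) : Prop := out = effective_trigger_py_alt trigger_entries org_repo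
instance (trigger_entries : List (List (String × List String))) (org_repo : String) (out : Option (List (String × List String))) : Decidable (Spec_effective_trigger_py trigger_entries org_repo out) := by unfold Spec_effective_trigger_py; infer_instance

-- ===== CLAIM (what is proved, stated in full; the proofs are below) =====
def Claim_equal_effective_trigger_py : Prop := ∀ (trigger_entries : List (List (String × List String))) (org_repo : String), Dom_effective_trigger_py trigger_entries org_repo → Spec_effective_trigger_py trigger_entries org_repo (effective_trigger_py trigger_entries org_repo)

-- ===== LEMMAS AND PROOFS =====

-- min?'s folding step as a named function (definitionally min?'s)
def pvStep {E : Type} (acc : Option (Nat × E)) (x : Nat × E) : Option (Nat × E) :=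
  match acc with
  | none => some x
  | some m => if x.1 < m.1 then some x else some m

theorem pvMinEqFold {E : Type} (xs : List (Nat × E)) :
    PySem.List.min? xs (fun m => m.1) = xs.foldl pvStep none := by
  unfold PySem.List.min?
  congr 1
  funext acc y
  cases acc <;> rfl

-- the fold started at a rank-0 element stays there (no Nat is < 0)
theorem pvFoldStep_zero {E : Type} (t : List (Nat × E)) (a : Nat × E) (ha : a.1 = 0) :
    t.foldl pvStep (some a) = some a := by
  induction t with
  | nil => rfl
  | cons y t ih =>
    simp only [List.foldl_cons, pvStep]
    have h : ¬ y.1 < a.1 := by omega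
    simp only [if_neg h]
    exact ih

-- the fold started at a rank-1 element over {0,1} ranks: first rank-0 wins
theorem pvFoldStep_one {E : Type} (t : List (Nat × E)) (a : Nat × E) (ha : a.1 = 1)
    (ht : ∀ p ∈ t, p.1 = 0 ∨ p.1 = 1) :
    t.foldl pvStep (some a) =
      match t.find? (fun p => p.1 == 0) with
      | some p => some p
      | none => some a := by
  induction t generalizing a with
  | nil => rfl
  | cons y t ih =>
    simp only [List.foldl_cons, pvStep, List.find?_cons]
    rcases ht y (by simp) with hy | hy
    · have h : y.1 < a.1 := by omega
      have hb : (y.1 == 0) = true := by simp [hy]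
      simp only [if_pos h, hb]
      exact pvFoldStep_zero t y hy
    · have h : ¬ y.1 < a.1 := by omega
      have hb : ¬ ((y.1 == 0) = true) := by simp [hy]
      simp only [if_neg h, hb]
      exact ih a ha (fun p hp => ht p (by simp [hp]))

-- stable min over {0,1}-ranked pairs: first rank-0 element if any, else the head
theorem pvMinChar {E : Type} (xs : List (Nat × E)) (h : ∀ p ∈ xs, p.1 = 0 ∨ p.1 = 1) :
    PySem.List.min? xs (fun m => m.1) =
      match xs.find? (fun p => p.1 == 0) with
      | some p => some p
      | none => xs.head? := by
  rw [pvMinEqFold]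
  cases xs with
  | nil => rfl
  | cons x t =>
    simp only [List.foldl_cons, List.find?_cons]
    have hx0 : pvStep none x = some x := rfl
    rw [hx0]
    rcases h x (by simp) with hx | hx
    · have hb : (x.1 == 0) = true := by simp [hx]
      simp only [hb]
      exact pvFoldStep_zero t x hx
    · have hb : ¬ ((x.1 == 0) = true) := by simp [hx]
      simp only [hb]
      rw [pvFoldStep_one t x hx (fun p hp => h p (by simp [hp]))]
      cases t.find? (fun p => p.1 == 0) <;> simp

-- every candidate carries rank 0 or 1
theorem pvCandidate_rank (org_repo org : String) (slash : Bool)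
    (l : List (List (String × List String))) :
    ∀ p ∈ l.filterMap (pvCandidate org_repo org slash), p.1 = 0 ∨ p.1 = 1 := by
  intro p hp
  rcases List.mem_filterMap.1 hp with ⟨e, _, he⟩
  unfold pvCandidate at he
  cases hg : pvGetRepos e with
  | none => rw [hg] at he; simp at he
  | some repos =>
    rw [hg] at he
    simp only [Option.bind_some] at he
    by_cases hc : org_repo ∈ repos ∨ (slash = true ∧ org ∈ repos)
    · rw [if_pos hc] at he
      cases he
      by_cases h0 : org_repo ∈ repos <;> simp [h0]
    · rw [if_neg hc] at he; cases he

-- the first rank-0 candidate is A's first org/repo match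
theorem pvFind0 (org_repo org : String) (slash : Bool)
    (l : List (List (String × List String))) :
    (l.filterMap (pvCandidate org_repo org slash)).find? (fun p => p.1 == 0) =
      (pvFirstMatch org_repo l).map (fun e => (0, e)) := by
  induction l with
  | nil => rfl
  | cons e rest ih =>
    rw [List.filterMap_cons]
    unfold pvFirstMatch
    cases hg : pvGetRepos e with
    | none =>
      have hce : pvCandidate org_repo org slash e = none := by simp [pvCandidate, hg]
      rw [hce]; exact ih
    | some repos =>
      by_cases h0 : org_repo ∈ repos
      · have hce : pvCandidate org_repo org slash e = some (0, e) := by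
          simp [pvCandidate, hg, h0]
        rw [hce, List.find?_cons]
        simp [h0]
      · by_cases h1 : slash = true ∧ org ∈ repos
        · have hce : pvCandidate org_repo org slash e = some (1, e) := by
            simp [pvCandidate, hg, h0, h1]
          rw [hce, List.find?_cons]
          simp [h0, ih]
        · have hce : pvCandidate org_repo org slash e = none := by
            have hc : ¬ (org_repo ∈ repos ∨ (slash = true ∧ org ∈ repos)) := by tauto
            simp [pvCandidate, hg, hc]
          rw [hce]
          simp [h0, ih]

-- with no org/repo match anywhere, the head candidate is A's first org-only match
theorem pvHead1 (org_repo org : String) (slash : Bool)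
    (l : List (List (String × List String)))
    (hnone : pvFirstMatch org_repo l = none) :
    (l.filterMap (pvCandidate org_repo org slash)).head? =
      if slash = true then (pvFirstMatch org l).map (fun e => (1, e)) else none := by
  induction l with
  | nil => cases slash <;> rfl
  | cons e rest ih =>
    unfold pvFirstMatch at hnone ⊢
    rw [List.filterMap_cons]
    cases hg : pvGetRepos e with
    | none =>
      rw [hg] at hnone
      have hce : pvCandidate org_repo org slash e = none := by simp [pvCandidate, hg]
      rw [hce]
      exact ih hnone
    | some repos =>
      rw [hg] at hnone
      by_cases h0 : org_repo ∈ repos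
      · simp [h0] at hnone
      · simp only [h0, if_false] at hnone
        by_cases h1 : slash = true ∧ org ∈ repos
        · have hce : pvCandidate org_repo org slash e = some (1, e) := by
            simp [pvCandidate, hg, h0, h1]
          rw [hce]
          simp [h1.1, h1.2]
        · have hce : pvCandidate org_repo org slash e = none := by
            have hc : ¬ (org_repo ∈ repos ∨ (slash = true ∧ org ∈ repos)) := by tauto
            simp [pvCandidate, hg, hc]
          rw [hce, ih hnone]
          by_cases hs : slash = true
          · have h2 : org ∉ repos := fun hx => h1 ⟨hs, hx⟩
            simp [hs, h2]
          · simp [hs]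

-- B's empty-list guard is absorbed by min? being none on []
theorem pvAltEq (trigger_entries : List (List (String × List String))) (org_repo : String) :
    effective_trigger_py_alt trigger_entries org_repo =
      (PySem.List.min? (trigger_entries.filterMap
        (pvCandidate org_repo
          (if decide ('/' ∈ org_repo.toList) then ((PySem.Str.splitMax? org_repo "/" 1).getD []).headD org_repo else org_repo)
          (decide ('/' ∈ org_repo.toList))))
        (fun m => m.1)).map (fun m => m.2) := by
  unfold effective_trigger_py_alt
  cases h : trigger_entries.filterMap (pvCandidate org_repo
      (if decide ('/' ∈ org_repo.toList) then ((PySem.Str.splitMax? org_repo "/" 1).getD []).headD org_repo else org_repo)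
      (decide ('/' ∈ org_repo.toList))) with
  | nil => simp only [h]; rfl
  | cons x t => simp only [h]

theorem effective_trigger_py_eq (trigger_entries : List (List (String × List String))) (org_repo : String) :
    effective_trigger_py trigger_entries org_repo = effective_trigger_py_alt trigger_entries org_repo := by
  rw [pvAltEq]
  by_cases hs : '/' ∈ org_repo.toList
  · have hb : decide ('/' ∈ org_repo.toList) = true := by simp [hs]
    rw [hb]
    rw [if_pos rfl]
    rw [pvMinChar _ (pvCandidate_rank org_repo _ true trigger_entries),
        pvFind0 org_repo _ true trigger_entries]
    cases hf : pvFirstMatch org_repo trigger_entries with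
    | some e =>
      unfold effective_trigger_py
      simp only [if_pos hs, hf, Option.map_some]
    | none =>
      rw [pvHead1 org_repo _ true trigger_entries hf]
      unfold effective_trigger_py
      simp only [if_pos hs, hf]
      cases pvFirstMatch (((PySem.Str.splitMax? org_repo "/" 1).getD []).headD org_repo) trigger_entries <;> simp
  · have hb : decide ('/' ∈ org_repo.toList) = false := by simp [hs]
    rw [hb]
    simp only [Bool.false_eq_true, if_false]
    rw [pvMinChar _ (pvCandidate_rank org_repo org_repo false trigger_entries),
        pvFind0 org_repo org_repo false trigger_entries]
    cases hf : pvFirstMatch org_repo trigger_entries with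
    | some e =>
      unfold effective_trigger_py
      simp [hs, hf]
    | none =>
      rw [pvHead1 org_repo org_repo false trigger_entries hf]
      unfold effective_trigger_py
      simp [hs, hf]

-- ===== VERDICT (by name: the statement is the Claim_ definition above) =====
theorem effective_trigger_py_spec : Claim_equal_effective_trigger_py := by
  intro te orp _
  exact effective_trigger_py_eq te orp
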